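-- pv_equiv track=rewrite | github.com/galtekar/berkeley-replay | tools/friday/console/examples/old/disjoint.py | has_k_disjoint_paths
-- ===== SOURCE A (Python) =====
-- def is_disjoint(pathlist):
-- 	for path1 in pathlist:
-- 		for path2 in pathlist:
-- 			if path1 != path2:
-- 				if len(path1 & path2) > 0:
-- 					return False
-- 	return True
--
-- def has_k_disjoint_paths(pathlist, k, k_subset=[]):
-- 	if k == 0:
-- 		if is_disjoint(k_subset):
-- 			return True
-- 		else:
-- 			return False
--
-- 	for path in pathlist:
-- 		# Avoid duplicates.
-- 		if path not in k_subset: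
-- 			ret = has_k_disjoint_paths(pathlist, k-1, k_subset + [path])
--
-- 			if ret == True:
-- 				return True
--
-- 	return False
-- ===== SOURCE B (Python) =====
-- # Backtracking over the distinct candidate paths in combination order with an
-- # incremental union of used nodes, instead of A's search over all ordered
-- # arrangements with a full pairwise disjointness recheck at the recursion bottom.
-- def has_k_disjoint_paths(pathlist, k, k_subset=[]):
-- 	# the distinct members of the existing subset must be pairwise disjoint
-- 	used = set()
-- 	seen = []
-- 	for p in k_subset:
-- 		if p not in seen:
-- 			seen.append(p)
-- 			if used & p:
-- 				return False
-- 			used |= p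
-- 	if k <= 0:
-- 		return k == 0
-- 	# distinct candidate paths not already in the subset
-- 	cands = []
-- 	for p in pathlist:
-- 		if p not in k_subset and p not in cands:
-- 			cands.append(p)
--
-- 	def search(cands, used, k):
-- 		if k == 0:
-- 			return True
-- 		for j, p in enumerate(cands):
-- 			if not (used & p) and search(cands[j + 1:], used | p, k - 1):
-- 				return True
-- 		return False
--
-- 	return search(cands, used, k)
-- ===== Notes on version B (the rewrite author's own statement) =====
-- stated objective: faster
-- what changed: A recursively tries every ordered arrangement of k further paths (re-scanning the whole pathlist at each level) and re-checks all pairs of the accumulated subset at the bottom of each complete branch; B validates the given subset once, builds the distinct candidate list once, then backtracks over candidates in combination order with an incremental union of used nodes, pruning any candidate that overlaps it.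
import Mathlib
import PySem

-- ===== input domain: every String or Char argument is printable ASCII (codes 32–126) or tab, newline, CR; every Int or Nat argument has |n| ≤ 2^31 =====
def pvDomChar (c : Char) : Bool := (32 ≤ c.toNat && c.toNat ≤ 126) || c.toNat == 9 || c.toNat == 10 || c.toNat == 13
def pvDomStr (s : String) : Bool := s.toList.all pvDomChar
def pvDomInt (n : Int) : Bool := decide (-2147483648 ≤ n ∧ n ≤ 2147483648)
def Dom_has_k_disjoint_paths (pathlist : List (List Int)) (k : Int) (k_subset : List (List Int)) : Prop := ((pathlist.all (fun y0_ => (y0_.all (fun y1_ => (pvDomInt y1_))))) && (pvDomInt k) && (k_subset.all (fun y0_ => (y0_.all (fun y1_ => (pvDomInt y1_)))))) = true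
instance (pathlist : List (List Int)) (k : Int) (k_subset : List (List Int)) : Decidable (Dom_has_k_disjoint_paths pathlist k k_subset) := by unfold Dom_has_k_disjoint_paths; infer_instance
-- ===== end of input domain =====

-- B replaces A's search over all ordered arrangements of paths (with a full pairwise
-- disjointness recheck at the bottom of the recursion) by a backtracking search over the
-- distinct candidate paths in combination order, keeping an incremental union of used nodes
-- and pruning any candidate that overlaps it.  The paths are Python sets (List Int here holds
-- the distinct elements); all set operations are ported with PySem.Set.

-- number of distinct paths (as sets) of pathlist not in k_subset; termination measure for A's port
def pvMeas (pathlist k_subset : List (List Int)) : Nat :=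
  ((pathlist.map List.toFinset).toFinset \ (k_subset.map List.toFinset).toFinset).card

-- Python '==' on sets, as the sets' element collections
lemma setEq_iff (p q : List Int) :
    PySem.Set.equal p q = true ↔ p.toFinset = q.toFinset := by
  rw [PySem.Set.equal_iff, Finset.ext_iff]
  simp

-- 'path in k_subset' for a list of sets uses set equality
lemma anyEq_iff (p : List Int) (l : List (List Int)) :
    (l.any (fun q => PySem.Set.equal p q)) = true ↔ p.toFinset ∈ (l.map List.toFinset).toFinset := by
  rw [List.any_eq_true]
  constructor
  · rintro ⟨q, hq, he⟩
    rw [setEq_iff] at he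
    rw [List.mem_toFinset, List.mem_map]
    exact ⟨q, hq, he.symm⟩
  · intro h
    rw [List.mem_toFinset, List.mem_map] at h
    obtain ⟨q, hq, he⟩ := h
    exact ⟨q, hq, (setEq_iff _ _).mpr he.symm⟩

lemma pvMeas_lt (pathlist k_subset : List (List Int)) (p : List Int)
    (hp : p ∈ pathlist) (hnp : (k_subset.any (fun q => PySem.Set.equal p q)) = false) :
    pvMeas pathlist (k_subset ++ [p]) < pvMeas pathlist k_subset := by
  have hKnot : p.toFinset ∉ (k_subset.map List.toFinset).toFinset := fun hm => by
    rw [← anyEq_iff] at hm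
    rw [hnp] at hm
    exact Bool.false_ne_true hm
  have hmem : p.toFinset ∈ (pathlist.map List.toFinset).toFinset \ (k_subset.map List.toFinset).toFinset := by
    rw [Finset.mem_sdiff]
    exact ⟨by rw [List.mem_toFinset, List.mem_map]; exact ⟨p, hp, rfl⟩, hKnot⟩
  have hsd : (pathlist.map List.toFinset).toFinset \ ((k_subset ++ [p]).map List.toFinset).toFinset
      = ((pathlist.map List.toFinset).toFinset \ (k_subset.map List.toFinset).toFinset).erase p.toFinset := by
    ext x
    constructor
    · intro hx
      rw [Finset.mem_sdiff] at hx
      obtain ⟨hx1, hx2⟩ := hx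
      rw [Finset.mem_erase, Finset.mem_sdiff]
      refine ⟨?_, hx1, ?_⟩
      · intro hxp
        exact hx2 (by rw [List.mem_toFinset, List.mem_map]; exact ⟨p, by simp, hxp.symm⟩)
      · intro hxk
        apply hx2
        rw [List.mem_toFinset, List.mem_map] at hxk ⊢
        obtain ⟨q, hq, hqx⟩ := hxk
        exact ⟨q, by simp [hq], hqx⟩
    · intro hx
      rw [Finset.mem_erase, Finset.mem_sdiff] at hx
      obtain ⟨hne, hx1, hx2⟩ := hx
      rw [Finset.mem_sdiff]
      refine ⟨hx1, ?_⟩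
      intro hxk
      rw [List.mem_toFinset, List.mem_map] at hxk
      obtain ⟨q, hq, hqx⟩ := hxk
      rcases List.mem_append.mp hq with h1 | h1
      · exact hx2 (by rw [List.mem_toFinset, List.mem_map]; exact ⟨q, h1, hqx⟩)
      · rw [List.mem_singleton] at h1
        subst h1
        exact hne hqx.symm
  unfold pvMeas
  rw [hsd]
  exact Finset.card_erase_lt_of_mem hmem

-- ===== PORT A =====
-- is_disjoint: nested loops with early 'return False' on a distinct overlapping pair
-- (p1 != p2 is set inequality; len(p1 & p2) > 0 is a nonempty intersection)
def isDisjointA (pathlist : List (List Int)) : Bool :=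
  if pathlist.any (fun p1 => pathlist.any (fun p2 =>
      !(PySem.Set.equal p1 p2) && decide (PySem.Set.inter p1 p2 ≠ []))) then false
  else true

mutual
-- literal recursion of A
def hkdpGo (pathlist : List (List Int)) (k : Int) (k_subset : List (List Int)) : Bool :=
  if k = 0 then isDisjointA k_subset
  else hkdpLoop pathlist k k_subset pathlist.attach
termination_by ((pvMeas pathlist k_subset, pathlist.length + 1) : Nat × Nat)
decreasing_by exact Prod.Lex.right _ (by simp)

-- the 'for path in pathlist' loop with early 'return True'
-- ('path not in k_subset' compares sets, i.e. uses PySem.Set.equal)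
def hkdpLoop (pathlist : List (List Int)) (k : Int) (k_subset : List (List Int)) :
    List {x : List Int // x ∈ pathlist} → Bool
  | [] => false
  | x :: rest =>
    if h : (k_subset.any (fun q => PySem.Set.equal x.1 q)) = true then
      hkdpLoop pathlist k k_subset rest
    else
      if hkdpGo pathlist (k - 1) (k_subset ++ [x.1]) then true
      else hkdpLoop pathlist k k_subset rest
termination_by l => ((pvMeas pathlist k_subset, l.length) : Nat × Nat)
decreasing_by
  · exact Prod.Lex.right _ (by simp)
  · exact Prod.Lex.left _ _ (pvMeas_lt _ _ _ x.2 (by simpa using h))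
  · exact Prod.Lex.right _ (by simp)
end

def has_k_disjoint_paths (pathlist : List (List Int)) (k : Int) (k_subset : List (List Int)) : Bool :=
  hkdpGo pathlist k k_subset

-- ===== PORT B =====
-- validate the given subset once: its distinct members must be pairwise disjoint
-- (incremental union 'used'; 'p not in seen' compares sets)
def altBase : List (List Int) → List (List Int) → PySem.Set Int → Option (PySem.Set Int)
  | [], _, used => some used
  | p :: rest, seen, used =>
    if seen.any (fun q => PySem.Set.equal p q) then altBase rest seen used
    else
      if PySem.Set.inter used p = [] then
        altBase rest (seen ++ [p]) (PySem.Set.union used p)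
      else none

-- distinct candidate paths not already in the subset
def altCands : List (List Int) → List (List Int) → List (List Int) → List (List Int)
  | [], _, acc => acc
  | p :: rest, ks, acc =>
    if ks.any (fun q => PySem.Set.equal p q) || acc.any (fun q => PySem.Set.equal p q) then
      altCands rest ks acc
    else altCands rest ks (acc ++ [p])

-- backtracking over combinations, pruning any candidate overlapping the used-node union
def altSearch (cands : List (List Int)) (used : PySem.Set Int) (k : Int) : Bool :=
  if k = 0 then true
  else
    match cands with
    | [] => false
    | c :: rest =>
      if decide (PySem.Set.inter used c = []) && altSearch rest (PySem.Set.union used c) (k - 1) then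
        true
      else altSearch rest used k

def has_k_disjoint_paths_alt (pathlist : List (List Int)) (k : Int) (k_subset : List (List Int)) : Bool :=
  match altBase k_subset [] PySem.Set.empty with
  | none => false
  | some used =>
    if k ≤ 0 then decide (k = 0)
    else altSearch (altCands pathlist k_subset []) used k

-- ===== PRECONDITION & SPEC =====
def Spec_has_k_disjoint_paths (pathlist : List (List Int)) (k : Int) (k_subset : List (List Int)) (out : Bool) : Prop := out = has_k_disjoint_paths_alt pathlist k k_subset
instance (pathlist : List (List Int)) (k : Int) (k_subset : List (List Int)) (out : Bool) : Decidable (Spec_has_k_disjoint_paths pathlist k k_subset out) := by unfold Spec_has_k_disjoint_paths; infer_instance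

-- ===== CLAIM (what is proved, stated in full; the proofs are below) =====
def Claim_equal_has_k_disjoint_paths : Prop := ∀ (pathlist : List (List Int)) (k : Int) (k_subset : List (List Int)), Dom_has_k_disjoint_paths pathlist k k_subset → Spec_has_k_disjoint_paths pathlist k k_subset (has_k_disjoint_paths pathlist k k_subset)

-- ===== LEMMAS AND PROOFS =====

-- the paths of a list, as a finite set of finite sets
def pvKf (l : List (List Int)) : Finset (Finset Int) := (l.map List.toFinset).toFinset

-- distinct members pairwise disjoint (equal members are never compared, as in A's is_disjoint)
def pvPD (S : Finset (Finset Int)) : Prop := ∀ a ∈ S, ∀ b ∈ S, a ≠ b → Disjoint a b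

-- what both programs compute: k further paths, distinct as sets and new to k_subset,
-- such that the completed subset is pairwise disjoint
def pvSpec (pathlist : List (List Int)) (k : Int) (k_subset : List (List Int)) : Prop :=
  0 ≤ k ∧ ∃ T : Finset (Finset Int), T ⊆ pvKf pathlist \ pvKf k_subset ∧
    T.card = k.toNat ∧ pvPD (pvKf k_subset ∪ T)

lemma pvPD_mono {S S' : Finset (Finset Int)} (h : S ⊆ S') (hPD : pvPD S') : pvPD S :=
  fun a ha b hb => hPD a (h ha) b (h hb)

lemma mem_pvKf {a : Finset Int} {l : List (List Int)} :
    a ∈ pvKf l ↔ ∃ p ∈ l, p.toFinset = a := by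
  unfold pvKf
  rw [List.mem_toFinset, List.mem_map]

lemma pvKf_append (ks : List (List Int)) (p : List Int) :
    pvKf (ks ++ [p]) = pvKf ks ∪ {p.toFinset} := by
  unfold pvKf
  rw [List.map_append, List.toFinset_append]
  simp

lemma not_mem_pvKf_of_any_false {p : List Int} {l : List (List Int)}
    (h : (l.any (fun q => PySem.Set.equal p q)) = false) : p.toFinset ∉ pvKf l := fun hm => by
  rw [mem_pvKf] at hm
  obtain ⟨q, hq, hqp⟩ := hm
  have : (l.any (fun q => PySem.Set.equal p q)) = true :=
    List.any_eq_true.mpr ⟨q, hq, (setEq_iff _ _).mpr hqp.symm⟩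
  rw [h] at this
  exact Bool.false_ne_true this

lemma any_false_of_not_mem_pvKf {p : List Int} {l : List (List Int)}
    (h : p.toFinset ∉ pvKf l) : (l.any (fun q => PySem.Set.equal p q)) = false := by
  rw [Bool.eq_false_iff]
  intro hany
  rw [List.any_eq_true] at hany
  obtain ⟨q, hq, hqe⟩ := hany
  exact h (mem_pvKf.mpr ⟨q, hq, ((setEq_iff _ _).mp hqe).symm⟩)

lemma inter_nil_iff (s t : List Int) :
    PySem.Set.inter s t = [] ↔ Disjoint s.toFinset t.toFinset := by
  rw [List.eq_nil_iff_forall_not_mem, Finset.disjoint_left]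
  constructor
  · intro h x hxs hxt
    exact h x ((PySem.Set.mem_inter _ _ _).mpr ⟨by simpa using hxs, by simpa using hxt⟩)
  · intro h x hx
    rw [PySem.Set.mem_inter] at hx
    exact h (by simpa using hx.1) (by simpa using hx.2)

lemma isDisjointA_iff (ks : List (List Int)) :
    isDisjointA ks = true ↔ pvPD (pvKf ks) := by
  unfold isDisjointA
  by_cases hC : (ks.any (fun p1 => ks.any (fun p2 =>
      !(PySem.Set.equal p1 p2) && decide (PySem.Set.inter p1 p2 ≠ [])))) = true
  · rw [if_pos hC]
    simp only [Bool.false_eq_true, false_iff]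
    intro hPD
    rw [List.any_eq_true] at hC
    obtain ⟨p1, h1, hin⟩ := hC
    rw [List.any_eq_true] at hin
    obtain ⟨p2, h2, hpair⟩ := hin
    rw [Bool.and_eq_true, Bool.not_eq_eq_eq_not, Bool.not_true, decide_eq_true_eq] at hpair
    obtain ⟨hne, hint⟩ := hpair
    have hane : p1.toFinset ≠ p2.toFinset := fun he => by
      have := (setEq_iff p1 p2).mpr he
      rw [hne] at this
      exact Bool.false_ne_true this
    have hdisj := hPD p1.toFinset (mem_pvKf.mpr ⟨p1, h1, rfl⟩) p2.toFinset (mem_pvKf.mpr ⟨p2, h2, rfl⟩) hane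
    rw [← inter_nil_iff] at hdisj
    exact hint hdisj
  · rw [if_neg hC]
    refine ⟨fun _ => ?_, fun _ => rfl⟩
    intro a ha b hb hne
    obtain ⟨p1, h1, rfl⟩ := mem_pvKf.mp ha
    obtain ⟨p2, h2, rfl⟩ := mem_pvKf.mp hb
    rw [List.any_eq_true] at hC
    push_neg at hC
    have hnp := hC p1 h1
    rw [Ne, List.any_eq_true] at hnp
    push_neg at hnp
    have hp2 := hnp p2 h2
    rw [Ne, Bool.and_eq_true, Bool.not_eq_eq_eq_not, Bool.not_true, decide_eq_true_eq] at hp2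
    push_neg at hp2
    have heq : PySem.Set.equal p1 p2 = false := by
      rw [Bool.eq_false_iff]
      intro he
      exact hne ((setEq_iff p1 p2).mp he)
    have hint := hp2 heq
    rw [← inter_nil_iff]
    exact hint

lemma hkdpLoop_true_iff (pl : List (List Int)) (k : Int) (ks : List (List Int)) :
    ∀ l : List {x : List Int // x ∈ pl},
      hkdpLoop pl k ks l = true ↔
        ∃ x ∈ l, (ks.any (fun q => PySem.Set.equal x.1 q)) = false ∧
          hkdpGo pl (k - 1) (ks ++ [x.1]) = true := by
  intro l
  induction l with
  | nil => rw [hkdpLoop]; simp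
  | cons x rest ih =>
    rw [hkdpLoop]
    by_cases hx : (ks.any (fun q => PySem.Set.equal x.1 q)) = true
    · rw [dif_pos hx, ih]
      constructor
      · rintro ⟨y, hy, h⟩
        exact ⟨y, List.mem_cons_of_mem _ hy, h⟩
      · rintro ⟨y, hy, hneq, hrec⟩
        rcases List.mem_cons.mp hy with rfl | hy'
        · rw [hx] at hneq
          exact absurd hneq (by simp)
        · exact ⟨y, hy', hneq, hrec⟩
    · rw [dif_neg hx]
      by_cases hrec : hkdpGo pl (k - 1) (ks ++ [x.1]) = true
      · rw [if_pos hrec]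
        refine ⟨fun _ => ⟨x, List.mem_cons_self, by simpa using hx, hrec⟩, fun _ => rfl⟩
      · rw [if_neg hrec, ih]
        constructor
        · rintro ⟨y, hy, h⟩
          exact ⟨y, List.mem_cons_of_mem _ hy, h⟩
        · rintro ⟨y, hy, hneq, hr⟩
          rcases List.mem_cons.mp hy with rfl | hy'
          · exact absurd hr hrec
          · exact ⟨y, hy', hneq, hr⟩

lemma hkdpGo_neg (pl : List (List Int)) (n : Nat) (k : Int) (ks : List (List Int))
    (hle : pvMeas pl ks ≤ n) (hk : k < 0) : hkdpGo pl k ks = false := by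
  induction n generalizing k ks with
  | zero =>
    rw [hkdpGo, if_neg (by omega), Bool.eq_false_iff]
    rw [Ne, hkdpLoop_true_iff]
    rintro ⟨x, _, hnin, _⟩
    have := pvMeas_lt pl ks x.1 x.2 hnin
    omega
  | succ n ih =>
    rw [hkdpGo, if_neg (by omega), Bool.eq_false_iff]
    rw [Ne, hkdpLoop_true_iff]
    rintro ⟨x, _, hnin, hrec⟩
    have hlt := pvMeas_lt pl ks x.1 x.2 hnin
    rw [ih (k - 1) (ks ++ [x.1]) (by omega) (by omega)] at hrec
    exact Bool.false_ne_true hrec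

lemma hkdpGo_iff (pl : List (List Int)) (n : Nat) (k : Int) (ks : List (List Int))
    (hle : pvMeas pl ks ≤ n) (hk : 0 ≤ k) :
    hkdpGo pl k ks = true ↔
      ∃ T : Finset (Finset Int), T ⊆ pvKf pl \ pvKf ks ∧ T.card = k.toNat ∧
        pvPD (pvKf ks ∪ T) := by
  induction n generalizing k ks with
  | zero =>
    rcases eq_or_lt_of_le hk with hk0 | hkpos
    · -- k = 0 : no recursion, the empty selection
      have hk0' : k = 0 := hk0.symm
      subst hk0'
      rw [hkdpGo, if_pos rfl, isDisjointA_iff]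
      constructor
      · intro hPD
        exact ⟨∅, by simp, by simp, by simpa using hPD⟩
      · rintro ⟨T, hsub, hcard, hPD⟩
        have hT : T = ∅ := Finset.card_eq_zero.mp (by simpa using hcard)
        subst hT
        simpa using hPD
    · -- 0 < k but no available path at measure 0 : both sides false
      have hes : pvMeas pl ks = 0 := by omega
      apply iff_of_false
      · rw [Bool.not_eq_true, hkdpGo, if_neg (by omega), Bool.eq_false_iff, Ne, hkdpLoop_true_iff]
        rintro ⟨x, _, hnin, _⟩
        have := pvMeas_lt pl ks x.1 x.2 hnin
        omega
      · rintro ⟨T, hsub, hcard, _⟩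
        have hTne : T.Nonempty := by
          rw [← Finset.card_pos, hcard]
          omega
        obtain ⟨t, ht⟩ := hTne
        have hne : (pvKf pl \ pvKf ks).Nonempty := ⟨t, hsub ht⟩
        have hpos := Finset.card_pos.mpr hne
        unfold pvMeas at hes
        unfold pvKf at hpos
        omega
  | succ n ih =>
    rcases eq_or_lt_of_le hk with hk0 | hkpos
    · -- k = 0 : identical to the base case
      have hk0' : k = 0 := hk0.symm
      subst hk0'
      rw [hkdpGo, if_pos rfl, isDisjointA_iff]
      constructor
      · intro hPD
        exact ⟨∅, by simp, by simp, by simpa using hPD⟩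
      · rintro ⟨T, hsub, hcard, hPD⟩
        have hT : T = ∅ := Finset.card_eq_zero.mp (by simpa using hcard)
        subst hT
        simpa using hPD
    · -- 0 < k : unroll one loop level
      rw [hkdpGo, if_neg (by omega), hkdpLoop_true_iff]
      constructor
      · rintro ⟨x, _, hnin, hrec⟩
        have hlt := pvMeas_lt pl ks x.1 x.2 hnin
        obtain ⟨T', hsub', hcard', hPD'⟩ :=
          (ih (k - 1) (ks ++ [x.1]) (by omega) (by omega)).mp hrec
        have hxK : x.1.toFinset ∉ pvKf ks := not_mem_pvKf_of_any_false hnin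
        have hxT' : x.1.toFinset ∉ T' := fun hm => by
          have := hsub' hm
          rw [Finset.mem_sdiff, pvKf_append] at this
          exact this.2 (Finset.mem_union_right _ (by simp))
        refine ⟨insert x.1.toFinset T', ?_, ?_, ?_⟩
        · intro t ht
          rcases Finset.mem_insert.mp ht with rfl | ht'
          · rw [Finset.mem_sdiff]
            exact ⟨mem_pvKf.mpr ⟨x.1, x.2, rfl⟩, hxK⟩
          · have := hsub' ht'
            rw [Finset.mem_sdiff, pvKf_append] at this
            rw [Finset.mem_sdiff]
            exact ⟨this.1, fun hkk => this.2 (Finset.mem_union_left _ hkk)⟩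
        · rw [Finset.card_insert_of_notMem hxT', hcard']
          omega
        · have hseteq : pvKf ks ∪ insert x.1.toFinset T' = pvKf (ks ++ [x.1]) ∪ T' := by
            rw [pvKf_append]
            ext t
            simp only [Finset.mem_union, Finset.mem_insert, Finset.mem_singleton]
            tauto
          rw [hseteq]
          exact hPD'
      · rintro ⟨T, hsub, hcard, hPD⟩
        have hTne : T.Nonempty := by
          rw [← Finset.card_pos, hcard]
          omega
        obtain ⟨t, ht⟩ := hTne
        have htPK := hsub ht
        rw [Finset.mem_sdiff] at htPK
        obtain ⟨htP, htK⟩ := htPK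
        obtain ⟨p, hp, rfl⟩ := mem_pvKf.mp htP
        have hnin : (ks.any (fun q => PySem.Set.equal p q)) = false :=
          any_false_of_not_mem_pvKf htK
        refine ⟨⟨p, hp⟩, List.mem_attach _ _, hnin, ?_⟩
        have hlt := pvMeas_lt pl ks p hp hnin
        rw [ih (k - 1) (ks ++ [p]) (by omega) (by omega)]
        refine ⟨T.erase p.toFinset, ?_, ?_, ?_⟩
        · intro y hy
          have hyT := Finset.mem_of_mem_erase hy
          have hyP := hsub hyT
          rw [Finset.mem_sdiff] at hyP
          rw [Finset.mem_sdiff, pvKf_append]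
          refine ⟨hyP.1, ?_⟩
          rw [Finset.mem_union]
          rintro (h1 | h1)
          · exact hyP.2 h1
          · rw [Finset.mem_singleton] at h1
            exact (Finset.ne_of_mem_erase hy) h1
        · rw [Finset.card_erase_of_mem ht, hcard]
          omega
        · have hseteq : pvKf (ks ++ [p]) ∪ T.erase p.toFinset = pvKf ks ∪ T := by
            rw [pvKf_append]
            ext y
            simp only [Finset.mem_union, Finset.mem_singleton, Finset.mem_erase]
            by_cases hyp : y = p.toFinset
            · subst hyp
              simp [ht]
            · tauto
          rw [hseteq]
          exact hPD

lemma A_iff (pathlist : List (List Int)) (k : Int) (k_subset : List (List Int)) :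
    has_k_disjoint_paths pathlist k k_subset = true ↔ pvSpec pathlist k k_subset := by
  unfold has_k_disjoint_paths pvSpec
  by_cases hk : 0 ≤ k
  · rw [hkdpGo_iff pathlist (pvMeas pathlist k_subset) k k_subset le_rfl hk]
    exact ⟨fun h => ⟨hk, h⟩, fun h => h.2⟩
  · rw [hkdpGo_neg pathlist (pvMeas pathlist k_subset) k k_subset le_rfl (by omega)]
    exact iff_of_false (by simp) (fun h => hk h.1)

lemma union_toFinset (s : PySem.Set Int) (t : List Int) :
    (PySem.Set.union s t).toFinset = s.toFinset ∪ t.toFinset := by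
  ext x
  simp only [List.mem_toFinset, Finset.mem_union]
  exact PySem.Set.mem_union _ _ _

lemma disjoint_sup_iff (S : Finset (Finset Int)) (a : Finset Int) :
    Disjoint (S.sup id) a ↔ ∀ s ∈ S, Disjoint s a := by
  rw [Finset.disjoint_sup_left]
  exact ⟨fun h s hs => h hs, fun h i hi => h i hi⟩

lemma anyEq_iff' (p : List Int) (l : List (List Int)) :
    (l.any (fun q => PySem.Set.equal p q)) = true ↔ p.toFinset ∈ pvKf l := by
  unfold pvKf
  exact anyEq_iff p l

lemma pvKf_cons (p : List Int) (l : List (List Int)) :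
    pvKf (p :: l) = insert p.toFinset (pvKf l) := by
  unfold pvKf
  simp

lemma altBase_char : ∀ (ks seen : List (List Int)) (used : PySem.Set Int),
    used.toFinset = (pvKf seen).sup id →
    pvPD (pvKf seen) →
    ((pvPD (pvKf seen ∪ pvKf ks) →
        ∃ u, altBase ks seen used = some u ∧ u.toFinset = (pvKf seen ∪ pvKf ks).sup id) ∧
     (¬ pvPD (pvKf seen ∪ pvKf ks) → altBase ks seen used = none)) := by
  intro ks
  induction ks with
  | nil =>
    intro seen used hu hP
    constructor
    · intro _
      refine ⟨used, rfl, ?_⟩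
      rw [hu]
      congr 1
      simp [pvKf]
    · intro h
      exact absurd (by simpa [pvKf] using hP) h
  | cons p rest ih =>
    intro seen used hu hP
    rw [altBase]
    by_cases hseen : (seen.any (fun q => PySem.Set.equal p q)) = true
    · have hpm : p.toFinset ∈ pvKf seen := (anyEq_iff' p seen).mp hseen
      have hsetEq : pvKf seen ∪ pvKf (p :: rest) = pvKf seen ∪ pvKf rest := by
        ext x
        simp only [Finset.mem_union, pvKf_cons, Finset.mem_insert]
        by_cases hx : x = p.toFinset
        · subst hx
          simp [hpm]
        · simp [hx]
      rw [if_pos hseen, hsetEq]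
      exact ih seen used hu hP
    · rw [if_neg hseen]
      have hpK : p.toFinset ∉ pvKf seen :=
        fun hm => hseen ((anyEq_iff' p seen).mpr hm)
      by_cases hint : PySem.Set.inter used p = []
      · rw [if_pos hint]
        have hdisj : Disjoint ((pvKf seen).sup id) p.toFinset := by
          have := (inter_nil_iff _ _).mp hint
          rwa [hu] at this
        have hP' : pvPD (pvKf (seen ++ [p])) := by
          rw [pvKf_append]
          intro a ha b hb hne
          rcases Finset.mem_union.mp ha with ha' | ha' <;> rcases Finset.mem_union.mp hb with hb' | hb'
          · exact hP a ha' b hb' hne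
          · rw [Finset.mem_singleton] at hb'
            subst hb'
            exact (disjoint_sup_iff _ _).mp hdisj a ha'
          · rw [Finset.mem_singleton] at ha'
            subst ha'
            exact ((disjoint_sup_iff _ _).mp hdisj b hb').symm
          · rw [Finset.mem_singleton] at ha' hb'
            subst ha'
            subst hb'
            exact absurd rfl hne
        have hu' : (PySem.Set.union used p).toFinset = (pvKf (seen ++ [p])).sup id := by
          rw [union_toFinset, hu, pvKf_append, Finset.sup_union, Finset.sup_singleton]
          rfl
        have hsetEq : pvKf (seen ++ [p]) ∪ pvKf rest = pvKf seen ∪ pvKf (p :: rest) := by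
          rw [pvKf_append, pvKf_cons]
          ext x
          simp only [Finset.mem_union, Finset.mem_singleton, Finset.mem_insert]
          tauto
        rw [← hsetEq]
        exact ih (seen ++ [p]) (PySem.Set.union used p) hu' hP'
      · rw [if_neg hint]
        constructor
        · intro hPDall
          exfalso
          have hnd : ¬ Disjoint used.toFinset p.toFinset :=
            fun hd => hint ((inter_nil_iff _ _).mpr hd)
          rw [hu] at hnd
          have hnall : ¬ ∀ s ∈ pvKf seen, Disjoint s p.toFinset :=
            fun hall => hnd ((disjoint_sup_iff _ _).mpr hall)
          push_neg at hnall
          obtain ⟨s, hs, hsd⟩ := hnall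
          have hsp : s ≠ p.toFinset := fun he => hpK (he ▸ hs)
          exact hsd (hPDall s (Finset.mem_union_left _ hs) p.toFinset
            (Finset.mem_union_right _ (by rw [pvKf_cons]; exact Finset.mem_insert_self _ _)) hsp)
        · intro _
          rfl

lemma altSearch_iff : ∀ (cands : List (List Int)) (used : PySem.Set Int) (k : Int), 0 ≤ k →
    (altSearch cands used k = true ↔
      ∃ sel : List (List Int), sel.Sublist cands ∧ sel.length = k.toNat ∧
        (∀ p ∈ sel, Disjoint used.toFinset p.toFinset) ∧
        (sel.map List.toFinset).Pairwise (fun a b => Disjoint a b)) := by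
  intro cands
  induction cands with
  | nil =>
    intro used k hk
    rw [altSearch]
    by_cases hk0 : k = 0
    · subst hk0
      rw [if_pos rfl]
      exact ⟨fun _ => ⟨[], List.nil_sublist _, by simp, by simp, by simp⟩, fun _ => rfl⟩
    · rw [if_neg hk0]
      apply iff_of_false (by simp)
      rintro ⟨sel, hsub, hlen, _, _⟩
      have : sel = [] := List.sublist_nil.mp hsub
      subst this
      simp only [List.length_nil] at hlen
      omega
  | cons c rest ih =>
    intro used k hk
    rw [altSearch]
    by_cases hk0 : k = 0
    · subst hk0
      rw [if_pos rfl]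
      exact ⟨fun _ => ⟨[], List.nil_sublist _, by simp, by simp, by simp⟩, fun _ => rfl⟩
    · rw [if_neg hk0]
      have hkpos : 0 < k := by omega
      constructor
      · intro h
        by_cases hcond : (decide (PySem.Set.inter used c = []) &&
            altSearch rest (PySem.Set.union used c) (k - 1)) = true
        · rw [Bool.and_eq_true, decide_eq_true_eq] at hcond
          obtain ⟨hd, hrec⟩ := hcond
          obtain ⟨sel', hsub', hlen', hdisj', hpw'⟩ := (ih _ (k - 1) (by omega)).mp hrec
          refine ⟨c :: sel', List.Sublist.cons₂ c hsub', ?_, ?_, ?_⟩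
          · simp only [List.length_cons, hlen']
            omega
          · intro p hp
            rcases List.mem_cons.mp hp with rfl | hp'
            · exact (inter_nil_iff _ _).mp hd
            · have := hdisj' p hp'
              rw [union_toFinset] at this
              exact (Finset.disjoint_union_left.mp this).1
          · rw [List.map_cons, List.pairwise_cons]
            refine ⟨?_, hpw'⟩
            intro b hb
            rw [List.mem_map] at hb
            obtain ⟨p, hp, rfl⟩ := hb
            have := hdisj' p hp
            rw [union_toFinset] at this
            exact (Finset.disjoint_union_left.mp this).2
        · rw [if_neg hcond] at h
          obtain ⟨sel, hs, hl, hd, hp⟩ := (ih used k hk).mp h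
          exact ⟨sel, List.Sublist.cons c hs, hl, hd, hp⟩
      · rintro ⟨sel, hsub, hlen, hdisj, hpw⟩
        rcases List.sublist_cons_iff.mp hsub with hcase | ⟨sel', rfl, hsub'⟩
        · by_cases hcond : (decide (PySem.Set.inter used c = []) &&
              altSearch rest (PySem.Set.union used c) (k - 1)) = true
          · rw [if_pos hcond]
          · rw [if_neg hcond]
            exact (ih used k hk).mpr ⟨sel, hcase, hlen, hdisj, hpw⟩
        · have hdC : Disjoint used.toFinset c.toFinset := hdisj c List.mem_cons_self
          rw [List.map_cons, List.pairwise_cons] at hpw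
          have hrec : altSearch rest (PySem.Set.union used c) (k - 1) = true := by
            apply (ih _ (k - 1) (by omega)).mpr
            refine ⟨sel', hsub', ?_, ?_, ?_⟩
            · have : sel'.length + 1 = k.toNat := by simpa using hlen
              omega
            · intro p hp
              rw [union_toFinset, Finset.disjoint_union_left]
              refine ⟨hdisj p (List.mem_cons_of_mem _ hp), ?_⟩
              exact hpw.1 p.toFinset (List.mem_map.mpr ⟨p, hp, rfl⟩)
            · exact hpw.2
          have hcond : (decide (PySem.Set.inter used c = []) &&
              altSearch rest (PySem.Set.union used c) (k - 1)) = true := by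
            rw [Bool.and_eq_true, decide_eq_true_eq]
            exact ⟨(inter_nil_iff _ _).mpr hdC, hrec⟩
          rw [if_pos hcond]

lemma altCands_inv (ks : List (List Int)) : ∀ (pl acc : List (List Int)),
    ((acc.map List.toFinset).Nodup) →
    ((altCands pl ks acc).map List.toFinset).Nodup ∧
    pvKf (altCands pl ks acc) = pvKf acc ∪ (pvKf pl \ pvKf ks) := by
  intro pl
  induction pl with
  | nil =>
    intro acc h
    rw [altCands]
    refine ⟨h, ?_⟩
    simp [pvKf]
  | cons p rest ih =>
    intro acc hnd
    rw [altCands]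
    by_cases hc : (ks.any (fun q => PySem.Set.equal p q) || acc.any (fun q => PySem.Set.equal p q)) = true
    · rw [if_pos hc]
      obtain ⟨h1, h2⟩ := ih acc hnd
      refine ⟨h1, ?_⟩
      rw [h2, pvKf_cons]
      have hpm : p.toFinset ∈ pvKf ks ∨ p.toFinset ∈ pvKf acc := by
        rw [Bool.or_eq_true] at hc
        rcases hc with h | h
        · exact Or.inl ((anyEq_iff' p ks).mp h)
        · exact Or.inr ((anyEq_iff' p acc).mp h)
      ext x
      simp only [Finset.mem_union, Finset.mem_sdiff, Finset.mem_insert]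
      by_cases hx : x = p.toFinset
      · subst hx
        rcases hpm with h | h
        · simp [h]
        · simp [h]
      · simp [hx]
    · rw [if_neg hc]
      rw [Bool.or_eq_true] at hc
      push_neg at hc
      obtain ⟨hks, hacc⟩ := hc
      have hpacc : p.toFinset ∉ pvKf acc := fun hm => hacc ((anyEq_iff' p acc).mpr hm)
      have hpks : p.toFinset ∉ pvKf ks := fun hm => hks ((anyEq_iff' p ks).mpr hm)
      have hnd' : ((acc ++ [p]).map List.toFinset).Nodup := by
        rw [List.map_append, List.nodup_append]
        refine ⟨hnd, by simp, ?_⟩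
        intro a ha b hb
        simp only [List.map_cons, List.map_nil, List.mem_singleton] at hb
        subst hb
        intro he
        exact hpacc (by rw [← he]; unfold pvKf; rw [List.mem_toFinset]; exact ha)
      obtain ⟨h1, h2⟩ := ih (acc ++ [p]) hnd'
      refine ⟨h1, ?_⟩
      rw [h2, pvKf_append, pvKf_cons]
      ext x
      simp only [Finset.mem_union, Finset.mem_singleton, Finset.mem_sdiff, Finset.mem_insert]
      by_cases hx : x = p.toFinset
      · subst hx
        simp [hpks]
      · simp [hx]

lemma B_iff (pathlist : List (List Int)) (k : Int) (k_subset : List (List Int)) :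
    has_k_disjoint_paths_alt pathlist k k_subset = true ↔ pvSpec pathlist k k_subset := by
  unfold has_k_disjoint_paths_alt pvSpec
  have hP0 : pvPD (pvKf ([] : List (List Int))) := by
    intro a ha b hb hne
    simp [pvKf] at ha
  have hu0 : (PySem.Set.empty : PySem.Set Int).toFinset = (pvKf ([] : List (List Int))).sup id := by
    simp [pvKf, PySem.Set.empty]
  have hbase := altBase_char k_subset [] PySem.Set.empty hu0 hP0
  have hKeq : pvKf ([] : List (List Int)) ∪ pvKf k_subset = pvKf k_subset := by
    simp [pvKf]
  by_cases hPD : pvPD (pvKf k_subset)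
  · obtain ⟨u, hsome, huF⟩ := hbase.1 (by rw [hKeq]; exact hPD)
    rw [hsome]
    rw [hKeq] at huF
    change (if k ≤ 0 then decide (k = 0) else altSearch (altCands pathlist k_subset []) u k) = true ↔ _
    by_cases hk0 : k ≤ 0
    · rw [if_pos hk0]
      constructor
      · intro h
        rw [decide_eq_true_eq] at h
        subst h
        exact ⟨le_refl 0, ∅, by simp, by simp, by simpa using hPD⟩
      · rintro ⟨hk, T, hsub, hcard, hPDT⟩
        have : k = 0 := by omega
        simp [this]
    · rw [if_neg hk0]
      have hkpos : 0 < k := by omega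
      obtain ⟨hndc, hKc⟩ := altCands_inv k_subset pathlist [] (by simp)
      have hKc' : pvKf (altCands pathlist k_subset []) = pvKf pathlist \ pvKf k_subset := by
        rw [hKc]
        simp [pvKf]
      rw [altSearch_iff _ u k (by omega)]
      constructor
      · rintro ⟨sel, hsub, hlen, hdisj, hpw⟩
        refine ⟨by omega, (sel.map List.toFinset).toFinset, ?_, ?_, ?_⟩
        · intro t ht
          rw [List.mem_toFinset, List.mem_map] at ht
          obtain ⟨p, hp, rfl⟩ := ht
          have hpc : p ∈ altCands pathlist k_subset [] := List.Sublist.subset hsub hp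
          rw [← hKc']
          exact mem_pvKf.mpr ⟨p, hpc, rfl⟩
        · have hndsel : (sel.map List.toFinset).Nodup :=
            List.Sublist.nodup (List.Sublist.map List.toFinset hsub) hndc
          rw [List.toFinset_card_of_nodup hndsel, List.length_map, hlen]
        · intro a ha b hb hne
          rcases Finset.mem_union.mp ha with haK | haT <;> rcases Finset.mem_union.mp hb with hbK | hbT
          · exact hPD a haK b hbK hne
          · rw [List.mem_toFinset, List.mem_map] at hbT
            obtain ⟨p, hp, rfl⟩ := hbT
            have := hdisj p hp
            rw [huF] at this
            exact ((disjoint_sup_iff _ _).mp this a haK).symm.symm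
          · rw [List.mem_toFinset, List.mem_map] at haT
            obtain ⟨p, hp, rfl⟩ := haT
            have := hdisj p hp
            rw [huF] at this
            exact ((disjoint_sup_iff _ _).mp this b hbK).symm
          · rw [List.mem_toFinset] at haT hbT
            exact List.Pairwise.forall (fun {x y} h => Disjoint.symm h) hpw haT hbT hne
      · rintro ⟨_, T, hsub, hcard, hPDT⟩
        have hTsub : T ⊆ pvKf (altCands pathlist k_subset []) := by
          rw [hKc']
          exact hsub
        refine ⟨(altCands pathlist k_subset []).filter (fun p => decide (p.toFinset ∈ T)),
          List.filter_sublist, ?_, ?_, ?_⟩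
        · -- length = T.card = k.toNat
          have hndsel : (((altCands pathlist k_subset []).filter
              (fun p => decide (p.toFinset ∈ T))).map List.toFinset).Nodup :=
            List.Sublist.nodup (List.Sublist.map List.toFinset List.filter_sublist) hndc
          have hteq : (((altCands pathlist k_subset []).filter
              (fun p => decide (p.toFinset ∈ T))).map List.toFinset).toFinset = T := by
            ext t
            rw [List.mem_toFinset, List.mem_map]
            constructor
            · rintro ⟨p, hp, rfl⟩
              rw [List.mem_filter, decide_eq_true_eq] at hp
              exact hp.2
            · intro ht
              obtain ⟨p, hp, rfl⟩ := mem_pvKf.mp (hTsub ht)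
              exact ⟨p, List.mem_filter.mpr ⟨hp, by rw [decide_eq_true_eq]; exact ht⟩, rfl⟩
          have := List.toFinset_card_of_nodup hndsel
          rw [hteq, hcard] at this
          rw [List.length_map] at this
          omega
        · intro p hp
          rw [List.mem_filter, decide_eq_true_eq] at hp
          rw [huF, disjoint_sup_iff]
          intro s hs
          have hpnK : p.toFinset ∉ pvKf k_subset := by
            have := hsub hp.2
            rw [Finset.mem_sdiff] at this
            exact this.2
          exact hPDT s (Finset.mem_union_left _ hs) p.toFinset
            (Finset.mem_union_right _ hp.2) (fun he => hpnK (he ▸ hs))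
        · have hndsel : (((altCands pathlist k_subset []).filter
              (fun p => decide (p.toFinset ∈ T))).map List.toFinset).Nodup :=
            List.Sublist.nodup (List.Sublist.map List.toFinset List.filter_sublist) hndc
          apply List.Nodup.pairwise_of_forall_ne hndsel
          intro a ha b hb hne
          rw [List.mem_map] at ha hb
          obtain ⟨p, hp, rfl⟩ := ha
          obtain ⟨q, hq, rfl⟩ := hb
          rw [List.mem_filter, decide_eq_true_eq] at hp hq
          exact hPDT p.toFinset (Finset.mem_union_right _ hp.2) q.toFinset
            (Finset.mem_union_right _ hq.2) hne
  · rw [hbase.2 (by rw [hKeq]; exact hPD)]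
    apply iff_of_false Bool.false_ne_true
    rintro ⟨_, T, hsub, hcard, hPDT⟩
    exact hPD (pvPD_mono Finset.subset_union_left hPDT)

-- ===== VERDICT (by name: the statement is the Claim_ definition above) =====
theorem has_k_disjoint_paths_spec : Claim_equal_has_k_disjoint_paths := by
  intro pl k ks _hdom
  unfold Spec_has_k_disjoint_paths
  rw [Bool.eq_iff_iff, A_iff, B_iff]
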